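-- pv_equiv track=rewrite | github.com/vincentqin-sys/GP | THS/hot_simple_win.py | findDrawDaysIndex
-- ===== SOURCE A (Python) =====
-- def findDrawDaysIndex(days, selDay, maxNum):
--     if not days:
--         return (0, 0)
--     if len(days) <= maxNum:
--         return (0, len(days))
--     if not selDay:
--         return (len(days) - maxNum, len(days))
--     #最左
--     if selDay <= days[0]:
--         return (0, maxNum)
--     #最右
--     if selDay >= days[len(days) - 1]:
--         return (len(days) - maxNum, len(days))
--
--     idx = 0
--     for i in range(len(days) - 1): # skip last day
--         if (selDay >= days[i]) and (selDay < days[i + 1]):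
--             idx = i
--             break
--     # 居中优先显示
--     fromIdx = lastIdx = idx
--     while True:
--         if lastIdx < len(days):
--             lastIdx += 1
--         if lastIdx - fromIdx >= maxNum:
--             break
--         if fromIdx > 0:
--             fromIdx -= 1
--         if lastIdx - fromIdx >= maxNum:
--             break
--     return (fromIdx, lastIdx)
-- ===== SOURCE B (Python) =====
-- def findDrawDaysIndex(days, selDay, maxNum):
--     n = len(days)
--     if n == 0:
--         return (0, 0)
--     if n <= maxNum:
--         return (0, n)
--     if not selDay:
--         return (n - maxNum, n)
--     if selDay <= days[0]:
--         return (0, maxNum)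
--     if selDay >= days[-1]:
--         return (n - maxNum, n)
--     # first adjacent pair bracketing selDay (0 if none)
--     idx = next((i for i, (a, b) in enumerate(zip(days, days[1:]))
--                 if a <= selDay < b), 0)
--     # centred window of size max(maxNum, 1), clamped to [0, n] -- closed form,
--     # no loop: right side gets the extra slot when the size is odd
--     m = max(maxNum, 1)
--     fromIdx = max(0, min(idx - m // 2, n - m))
--     return (fromIdx, fromIdx + m)
-- ===== Notes on version B (the rewrite author's own statement) =====
-- stated objective: alternative
-- what changed: A's centring while-loop that grows the window step by step is replaced by a closed-form clamped-window formula (max/min arithmetic), and the bracketing index is found by scanning adjacent pairs of zip(days, days[1:]) instead of indexing with range; B trades the loop for O(1) arithmetic of the same total cost (the O(n) scan dominates both).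
import Mathlib
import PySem

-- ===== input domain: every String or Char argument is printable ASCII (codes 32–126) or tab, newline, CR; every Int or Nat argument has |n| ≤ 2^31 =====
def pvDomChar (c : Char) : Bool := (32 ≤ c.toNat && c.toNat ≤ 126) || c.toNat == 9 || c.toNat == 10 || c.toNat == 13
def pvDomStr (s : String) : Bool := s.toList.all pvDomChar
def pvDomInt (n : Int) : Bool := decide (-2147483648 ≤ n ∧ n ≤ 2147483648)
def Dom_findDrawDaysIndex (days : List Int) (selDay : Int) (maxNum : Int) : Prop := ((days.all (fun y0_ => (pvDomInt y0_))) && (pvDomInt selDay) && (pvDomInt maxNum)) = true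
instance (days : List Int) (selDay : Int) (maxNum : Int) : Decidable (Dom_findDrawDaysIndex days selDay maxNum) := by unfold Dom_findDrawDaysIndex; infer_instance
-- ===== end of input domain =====

-- B replaces A's centring while-loop by a closed-form clamped-window formula and
-- scans adjacent pairs instead of indices (objective: simpler).

-- ===== PORT A =====
-- the 'for i in range(len(days)-1)' first-match scan, with default 0
def pvIdxScanA (days : List Int) (selDay : Int) : List Int → Int
  | [] => 0
  | i :: rest =>
    if selDay ≥ PySem.List.pyGetD days i 0 ∧ selDay < PySem.List.pyGetD days (i + 1) 0
    then i else pvIdxScanA days selDay rest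

-- the 'while True' centring loop; the fuel argument only makes the recursion total
-- (at the call site maxNum < len(days), so len(days)+1 iterations always suffice)
def pvCenterA (n maxNum : Int) : Nat → Int → Int → List Int
  | 0, f, l => [f, l]
  | fuel + 1, f, l =>
    let l1 := if l < n then l + 1 else l
    if l1 - f ≥ maxNum then [f, l1]
    else
      let f1 := if f > 0 then f - 1 else f
      if l1 - f1 ≥ maxNum then [f1, l1]
      else pvCenterA n maxNum fuel f1 l1

def findDrawDaysIndex (days : List Int) (selDay : Int) (maxNum : Int) : List Int :=
  let n : Int := days.length
  if days = [] then [0, 0]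
  else if n ≤ maxNum then [0, n]
  else if selDay = 0 then [n - maxNum, n]
  else if selDay ≤ PySem.List.pyGetD days 0 0 then [0, maxNum]
  else if selDay ≥ PySem.List.pyGetD days (n - 1) 0 then [n - maxNum, n]
  else
    let idx := pvIdxScanA days selDay (PySem.List.pyRange 0 (n - 1) 1)
    pvCenterA n maxNum (days.length + 1) idx idx

-- ===== PORT B =====
-- first adjacent pair (a,b) with a ≤ selDay < b, scanning enumerate(zip(days, days[1:]))
def pvPairScanB (selDay : Int) : Int → List (Int × Int) → Int
  | _, [] => 0
  | i, (a, b) :: rest => if a ≤ selDay ∧ selDay < b then i else pvPairScanB selDay (i + 1) rest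

def findDrawDaysIndex_alt (days : List Int) (selDay : Int) (maxNum : Int) : List Int :=
  let n : Int := days.length
  if n = 0 then [0, 0]
  else if n ≤ maxNum then [0, n]
  else if selDay = 0 then [n - maxNum, n]
  else if selDay ≤ PySem.List.pyGetD days 0 0 then [0, maxNum]
  else if selDay ≥ PySem.List.pyGetD days (-1) 0 then [n - maxNum, n]
  else
    let idx := pvPairScanB selDay 0 (days.zip (PySem.List.slice days (some 1) none))
    let m := max maxNum 1
    let f := max 0 (min (idx - PySem.Int.floordiv m 2) (n - m))
    [f, f + m]

-- ===== PRECONDITION & SPEC =====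
def Spec_findDrawDaysIndex (days : List Int) (selDay : Int) (maxNum : Int) (out : List Int) : Prop := out = findDrawDaysIndex_alt days selDay maxNum
instance (days : List Int) (selDay : Int) (maxNum : Int) (out : List Int) : Decidable (Spec_findDrawDaysIndex days selDay maxNum out) := by unfold Spec_findDrawDaysIndex; infer_instance

-- ===== CLAIM (what is proved, stated in full; the proofs are below) =====
def Claim_equal_findDrawDaysIndex : Prop := ∀ (days : List Int) (selDay : Int) (maxNum : Int), Dom_findDrawDaysIndex days selDay maxNum → Spec_findDrawDaysIndex days selDay maxNum (findDrawDaysIndex days selDay maxNum)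

-- ===== LEMMAS AND PROOFS =====

-- the two first-match scans agree (A over range indices, B over zipped adjacent pairs)
theorem pvScan_eq (days : List Int) (selDay : Int) : ∀ (k : Nat),
    pvIdxScanA days selDay (PySem.List.pyRange (k : Int) ((days.length : Int) - 1) 1)
      = pvPairScanB selDay (k : Int) ((days.drop k).zip (days.drop (k + 1))) := by
  intro k
  induction hd : days.length - 1 - k generalizing k with
  | zero =>
    have h1 : PySem.List.pyRange (k : Int) ((days.length : Int) - 1) 1 = [] := by
      simp [PySem.List.pyRange]; omega
    have h2 : days.drop (k + 1) = [] := List.drop_eq_nil_of_le (by omega)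
    rw [h1, h2, List.zip_nil_right]
    rfl
  | succ d ih =>
    have hk1 : k + 1 < days.length := by omega
    have hk : k < days.length := by omega
    rw [PySem.List.pyRange_one_cons (by omega : (k : Int) < (days.length : Int) - 1)]
    rw [List.drop_eq_getElem_cons hk, List.drop_eq_getElem_cons hk1]
    rw [List.zip_cons_cons]
    have e1 : PySem.List.pyGetD days (k : Int) 0 = days[k] := by
      rw [PySem.List.pyGetD_eq_getElem days 0 (by omega) (by exact_mod_cast hk)]
      simp
    have e2 : PySem.List.pyGetD days ((k : Int) + 1) 0 = days[k + 1] := by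
      rw [show ((k : Int) + 1) = ((k + 1 : Nat) : Int) by push_cast; ring]
      rw [PySem.List.pyGetD_eq_getElem days 0 (by omega) (by exact_mod_cast hk1)]
      simp
    simp only [pvIdxScanA, pvPairScanB]
    rw [e1, e2]
    by_cases hc : days[k] ≤ selDay ∧ selDay < days[k + 1]
    · rw [if_pos ⟨hc.1, hc.2⟩, if_pos hc]
    · rw [if_neg (by tauto), if_neg hc]
      rw [← List.drop_eq_getElem_cons hk1]
      have := ih (k + 1) (by omega)
      rw [show ((k : Int) + 1) = ((k + 1 : Nat) : Int) by push_cast; ring]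
      exact this

-- B's scan result is 0 or lies in [i, i + number of pairs)
theorem pvPairScanB_bound (selDay : Int) : ∀ (ps : List (Int × Int)) (i : Int), 0 ≤ i →
    pvPairScanB selDay i ps = 0 ∨
      (i ≤ pvPairScanB selDay i ps ∧ pvPairScanB selDay i ps < i + ps.length) := by
  intro ps
  induction ps with
  | nil => intro i h; left; rfl
  | cons p rest ih =>
    intro i h
    obtain ⟨a, b⟩ := p
    simp only [pvPairScanB]
    by_cases hc : a ≤ selDay ∧ selDay < b
    · rw [if_pos hc]; right
      refine ⟨le_refl i, ?_⟩
      simp only [List.length_cons]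
      omega
    · rw [if_neg hc]
      rcases ih (i + 1) (by omega) with h1 | ⟨h1, h2⟩
      · left; exact h1
      · right
        simp only [List.length_cons]
        push_cast at h2 ⊢
        omega

-- the centring loop computes the clamped centred window, in closed form
theorem pvCenter_closed (n m : Int) : ∀ (fuel : Nat) (f l : Int),
    0 ≤ f → f ≤ l → l ≤ n → l - f < m → m ≤ n → (m - (l - f)).toNat ≤ fuel →
    pvCenterA n m fuel f l
      = [max 0 (min (f - PySem.Int.floordiv (m - (l - f)) 2) (n - m)),
         max 0 (min (f - PySem.Int.floordiv (m - (l - f)) 2) (n - m)) + m] := by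
  intro fuel
  induction fuel with
  | zero => intro f l h0 h1 h2 h3 h4 h5; exfalso; omega
  | succ fuel ih =>
    intro f l h0 h1 h2 h3 h4 h5
    rw [PySem.Int.floordiv_eq_ediv_of_pos (by omega : (0:Int) < 2)]
    simp only [pvCenterA]
    by_cases hl : l < n
    · rw [if_pos hl]
      by_cases hb1 : l + 1 - f ≥ m
      · rw [if_pos hb1]
        simp only [List.cons.injEq, and_true]; constructor <;> omega
      · rw [if_neg hb1]
        by_cases hf : f > 0
        · rw [if_pos hf]
          by_cases hb2 : l + 1 - (f - 1) ≥ m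
          · rw [if_pos hb2]
            simp only [List.cons.injEq, and_true]; constructor <;> omega
          · rw [if_neg hb2]
            rw [ih (f - 1) (l + 1) (by omega) (by omega) (by omega) (by omega) h4 (by omega)]
            rw [PySem.Int.floordiv_eq_ediv_of_pos (by omega : (0:Int) < 2)]
            simp only [List.cons.injEq, and_true]; constructor <;> omega
        · rw [if_neg hf]
          rw [if_neg (by omega : ¬ l + 1 - f ≥ m)]
          rw [ih f (l + 1) (by omega) (by omega) (by omega) (by omega) h4 (by omega)]
          rw [PySem.Int.floordiv_eq_ediv_of_pos (by omega : (0:Int) < 2)]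
          simp only [List.cons.injEq, and_true]; constructor <;> omega
    · rw [if_neg hl]
      rw [if_neg (by omega : ¬ l - f ≥ m)]
      have hf : f > 0 := by omega
      rw [if_pos hf]
      by_cases hb2 : l - (f - 1) ≥ m
      · rw [if_pos hb2]
        simp only [List.cons.injEq, and_true]; constructor <;> omega
      · rw [if_neg hb2]
        rw [ih (f - 1) l (by omega) (by omega) (by omega) (by omega) h4 (by omega)]
        rw [PySem.Int.floordiv_eq_ediv_of_pos (by omega : (0:Int) < 2)]
        simp only [List.cons.injEq, and_true]; constructor <;> omega

-- ===== VERDICT (by name: the statement is the Claim_ definition above) =====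
theorem findDrawDaysIndex_spec : Claim_equal_findDrawDaysIndex := by
  unfold Claim_equal_findDrawDaysIndex Spec_findDrawDaysIndex
  intro days selDay maxNum _
  by_cases hnil : days = []
  · subst hnil; simp [findDrawDaysIndex, findDrawDaysIndex_alt]
  · have hlen : 0 < days.length := List.length_pos_iff.mpr hnil
    simp only [findDrawDaysIndex, findDrawDaysIndex_alt]
    have hz : ¬ ((days.length : Int) = 0) := by
      simp only [Int.natCast_eq_zero]
      omega
    rw [if_neg hnil, if_neg hz]
    by_cases h2 : (days.length : Int) ≤ maxNum
    · rw [if_pos h2, if_pos h2]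
    · rw [if_neg h2, if_neg h2]
      by_cases h3 : selDay = 0
      · rw [if_pos h3, if_pos h3]
      · rw [if_neg h3, if_neg h3]
        by_cases h4 : selDay ≤ PySem.List.pyGetD days 0 0
        · rw [if_pos h4, if_pos h4]
        · rw [if_neg h4, if_neg h4]
          have elast : PySem.List.pyGetD days (-1) 0 = PySem.List.pyGetD days ((days.length : Int) - 1) 0 := by
            rw [PySem.List.pyGetD_neg_ofNat days 1 0 (by omega) (by omega),
                PySem.List.pyGetD_eq_getElem days 0 (by omega) (by omega)]
            exact getElem_congr rfl (by omega) (by omega)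
          rw [elast]
          by_cases h5 : selDay ≥ PySem.List.pyGetD days ((days.length : Int) - 1) 0
          · rw [if_pos h5, if_pos h5]
          · rw [if_neg h5, if_neg h5]
            have hslice : PySem.List.slice days (some 1) none = days.drop 1 := by
              rw [show (1 : Int) = ((1 : Nat) : Int) by norm_num]
              exact PySem.List.slice_from_natCast days 1
            rw [hslice]
            have hidx : pvIdxScanA days selDay (PySem.List.pyRange 0 ((days.length : Int) - 1) 1)
                = pvPairScanB selDay 0 (days.zip (days.drop 1)) := by
              have := pvScan_eq days selDay 0
              simpa using this
            rw [hidx]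
            have hn2 : 2 ≤ days.length := by
              by_contra hc
              have hlen1 : days.length = 1 := by omega
              rw [hlen1] at h5
              norm_num at h5 h4
              linarith
            obtain hb := pvPairScanB_bound selDay (days.zip (days.drop 1)) 0 (le_refl 0)
            have hziplen : (days.zip (days.drop 1)).length = days.length - 1 := by
              rw [List.length_zip, List.length_drop]
              omega
            rw [hziplen] at hb
            set j := pvPairScanB selDay 0 (days.zip (days.drop 1)) with hjdef
            have hj0 : 0 ≤ j := by rcases hb with h | h; omega; exact h.1
            have hj2 : j ≤ (days.length : Int) - 2 := by
              rcases hb with h | h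
              · omega
              · have := h.2; push_cast at this ⊢; omega
            by_cases hm : 1 ≤ maxNum
            · rw [max_eq_left hm]
              rw [pvCenter_closed (days.length : Int) maxNum (days.length + 1) j j
                    hj0 (le_refl j) (by omega) (by omega) (by omega) (by omega)]
              rw [sub_self, sub_zero]
            · rw [max_eq_right (by omega : maxNum ≤ 1)]
              show pvCenterA (days.length : Int) maxNum (days.length + 1) j j = _
              simp only [pvCenterA]
              rw [if_pos (by omega : j < (days.length : Int))]
              rw [if_pos (by omega : j + 1 - j ≥ maxNum)]
              rw [show PySem.Int.floordiv 1 2 = 0 by decide]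
              simp only [List.cons.injEq, and_true]
              constructor <;> omega
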